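-- pv_equiv track=rewrite | github.com/tristanhussain/adk-samples-capstone | python/agents/invoice_processing/invoice_processing/core/prompts.py | extract_relevant_rules_book_sections
-- ===== SOURCE A (Python) =====
-- _MAX_PROMPT_CHARS = 8000
--
-- def extract_relevant_rules_book_sections(
--     rules_book_text: str,
--     failing_phase: str,
--     failing_step: str = "",
-- ) -> str:
--     """
--     Extract sections from the rules book relevant to the failing phase/step.
--
--     Rather than sending the entire 80K rules book to the LLM, extract
--     only the sections relevant to where the agent failed.
--     """
--     lines = rules_book_text.split("\n")
--     sections = []
--     current_section = []
--     in_relevant = False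
--
--     # Phase to section header mapping
--     phase_headers = {
--         "phase1": ["## 4. Phase 1", "Phase 1 Validation"],
--         "phase2": ["## 5. Phase 2", "Phase 2 Validation"],
--         "phase3": ["## 6. Phase 3", "Phase 3 Validation"],
--         "phase4": ["## 7. Phase 4", "Phase 4 Validation"],
--     }
--
--     # Also always include pipeline overview and exception handling
--     always_include = ["## 1. Pipeline Overview", "## 9. Exception Handling"]
--
--     relevant_headers = phase_headers.get(
--         failing_phase.lower().replace(" ", ""), []
--     )
--     relevant_headers.extend(always_include)
--
--     for line in lines:
--         # Detect section headers (## level)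
--         if line.startswith("## "):
--             # Save previous section if relevant
--             if in_relevant and current_section:
--                 sections.append("\n".join(current_section))
--             current_section = [line]
--             in_relevant = any(h in line for h in relevant_headers)
--         elif current_section is not None:
--             current_section.append(line)
--
--     # Don't forget last section
--     if in_relevant and current_section:
--         sections.append("\n".join(current_section))
--
--     result = "\n\n---\n\n".join(sections)
--
--     # Truncate if too long (max ~8K chars)
--     if len(result) > _MAX_PROMPT_CHARS:
--         result = result[:_MAX_PROMPT_CHARS] + "\n\n[...truncated...]"
--
--     return result if result else "(No relevant rules book sections found)"
-- ===== SOURCE B (Python) =====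
-- _MAX_PROMPT_CHARS = 8000
--
-- _PHASE_HEADERS = {
--     "phase1": ["## 4. Phase 1", "Phase 1 Validation"],
--     "phase2": ["## 5. Phase 2", "Phase 2 Validation"],
--     "phase3": ["## 6. Phase 3", "Phase 3 Validation"],
--     "phase4": ["## 7. Phase 4", "Phase 4 Validation"],
-- }
-- _ALWAYS_INCLUDE = ["## 1. Pipeline Overview", "## 9. Exception Handling"]
--
--
-- def extract_relevant_rules_book_sections(
--     rules_book_text: str,
--     failing_phase: str,
--     failing_step: str = "",
-- ) -> str:
--     headers = _PHASE_HEADERS.get(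
--         failing_phase.lower().replace(" ", ""), []
--     ) + _ALWAYS_INCLUDE
--
--     # Walk the lines BOTTOM-UP: body lines accumulate until the header above
--     # them is reached, at which point the section is complete and its
--     # relevance can be decided on the spot (no in_relevant flag is carried).
--     # Lines above the first header never meet a header and are discarded.
--     sections_rev = []
--     tail = []  # lines below the current position up to the next header, reversed
--     for line in reversed(rules_book_text.split("\n")):
--         if line.startswith("## "):
--             if any(h in line for h in headers):
--                 sections_rev.append("\n".join([line] + tail[::-1]))
--             tail = []
--         else:
--             tail.append(line)
--
--     result = "\n\n---\n\n".join(sections_rev[::-1])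
--     if len(result) > _MAX_PROMPT_CHARS:
--         result = result[:_MAX_PROMPT_CHARS] + "\n\n[...truncated...]"
--     return result if result else "(No relevant rules book sections found)"
-- ===== Notes on version B (the rewrite author's own statement) =====
-- stated objective: alternative
-- what changed: Replaced A's forward state machine (in_relevant flag, save-previous-section-on-next-header, explicit last-section fixup) by a bottom-up traversal over reversed(lines): body lines accumulate until their header is reached, where the complete section's relevance is decided immediately; no flag, no trailing-section special case, preamble discarded naturally.
import Mathlib
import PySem

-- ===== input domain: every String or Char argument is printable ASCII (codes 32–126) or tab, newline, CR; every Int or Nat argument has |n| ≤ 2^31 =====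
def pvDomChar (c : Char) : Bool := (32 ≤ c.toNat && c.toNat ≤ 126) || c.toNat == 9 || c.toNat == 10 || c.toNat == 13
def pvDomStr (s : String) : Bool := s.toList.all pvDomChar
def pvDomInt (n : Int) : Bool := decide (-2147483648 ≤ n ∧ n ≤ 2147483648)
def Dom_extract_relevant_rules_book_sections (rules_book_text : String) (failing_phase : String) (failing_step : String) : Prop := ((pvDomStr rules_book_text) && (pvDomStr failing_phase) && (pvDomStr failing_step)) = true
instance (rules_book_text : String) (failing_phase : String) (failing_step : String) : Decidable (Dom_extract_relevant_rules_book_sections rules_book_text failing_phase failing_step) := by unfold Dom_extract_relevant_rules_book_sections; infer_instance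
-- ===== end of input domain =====

-- B walks the lines BOTTOM-UP (reverse traversal): a section's body accumulates until its header
-- is reached, where relevance is decided on the spot — no in_relevant flag, preamble discarded
-- naturally; same cost, a different traversal order (objective: alternative).
-- Both Pythons end with the same join/truncate/fallback lines and the same relevant-header
-- computation; these are shared transliterated helpers pvFinish / pvHeaders used by both ports.

def pvHeaders (failing_phase : String) : List String :=
  PySem.Dict.getD
    (PySem.Dict.ofList
      [("phase1", ["## 4. Phase 1", "Phase 1 Validation"]),
       ("phase2", ["## 5. Phase 2", "Phase 2 Validation"]),
       ("phase3", ["## 6. Phase 3", "Phase 3 Validation"]),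
       ("phase4", ["## 7. Phase 4", "Phase 4 Validation"])])
    (PySem.Str.replace (PySem.Str.lower failing_phase) " " "") []
  ++ ["## 1. Pipeline Overview", "## 9. Exception Handling"]

def pvFinish (sections : List String) : String :=
  let result := PySem.Str.join "\n\n---\n\n" sections
  let result :=
    if 8000 < PySem.Str.len result then
      PySem.Str.slice result none (some 8000) ++ "\n\n[...truncated...]"
    else result
  if result = "" then "(No relevant rules book sections found)" else result

-- ===== PORT A =====
-- A's loop body ('elif current_section is not None' is always true, so it is the plain else branch)
def pvStepA (relevant_headers : List String) (st : List String × List String × Bool) (line : String) :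
    List String × List String × Bool :=
  if PySem.Str.startswith line "## " then
    ((if st.2.2 && !st.2.1.isEmpty then st.1 ++ [PySem.Str.join "\n" st.2.1] else st.1),
     [line],
     relevant_headers.any (fun h => PySem.Str.isIn h line))
  else
    (st.1, st.2.1 ++ [line], st.2.2)

def extract_relevant_rules_book_sections (rules_book_text : String) (failing_phase : String) (failing_step : String) : String :=
  let lines := (PySem.Str.split? rules_book_text "\n").getD []   -- sep "\n" ≠ "", so split? is always some
  let relevant_headers := pvHeaders failing_phase
  let st := lines.foldl (pvStepA relevant_headers) ([], [], false)
  let sections := if st.2.2 && !st.2.1.isEmpty then st.1 ++ [PySem.Str.join "\n" st.2.1] else st.1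
  pvFinish sections

-- ===== PORT B =====
-- 'any(h in line for h in headers)'
def pvRelB (headers : List String) (line : String) : Bool :=
  headers.any (fun h => PySem.Str.isIn h line)

-- B's loop body over the REVERSED lines; state = (sections_rev, tail)
def pvStepB (headers : List String) (st : List String × List String) (line : String) :
    List String × List String :=
  if PySem.Str.startswith line "## " then
    ((if pvRelB headers line then st.1 ++ [PySem.Str.join "\n" ([line] ++ st.2.reverse)] else st.1),
     [])
  else
    (st.1, st.2 ++ [line])

def extract_relevant_rules_book_sections_alt (rules_book_text : String) (failing_phase : String) (failing_step : String) : String :=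
  let headers := pvHeaders failing_phase
  let lines := (PySem.Str.split? rules_book_text "\n").getD []
  let st := lines.reverse.foldl (pvStepB headers) ([], [])   -- 'for line in reversed(lines)'
  pvFinish st.1.reverse                                      -- 'sections_rev[::-1]'

-- ===== PRECONDITION & SPEC =====
def Spec_extract_relevant_rules_book_sections (rules_book_text : String) (failing_phase : String) (failing_step : String) (out : String) : Prop := out = extract_relevant_rules_book_sections_alt rules_book_text failing_phase failing_step
instance (rules_book_text : String) (failing_phase : String) (failing_step : String) (out : String) : Decidable (Spec_extract_relevant_rules_book_sections rules_book_text failing_phase failing_step out) := by unfold Spec_extract_relevant_rules_book_sections; infer_instance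

-- ===== CLAIM (what is proved, stated in full; the proofs are below) =====
def Claim_equal_extract_relevant_rules_book_sections : Prop := ∀ (rules_book_text : String) (failing_phase : String) (failing_step : String), Dom_extract_relevant_rules_book_sections rules_book_text failing_phase failing_step → Spec_extract_relevant_rules_book_sections rules_book_text failing_phase failing_step (extract_relevant_rules_book_sections rules_book_text failing_phase failing_step)

-- ===== LEMMAS AND PROOFS =====

-- a line is a header line
def pvHdr (line : String) : Bool := PySem.Str.startswith line "## "

-- The common mathematical description both ports are reduced to: the joined relevant sections,
-- computed by splitting off one header-led section at a time.
def pvT (hs : List String) : List String → List String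
  | [] => []
  | l :: rest =>
    if pvHdr l then
      (if pvRelB hs l then [PySem.Str.join "\n" (l :: rest.takeWhile (fun x => !pvHdr x))] else [])
        ++ pvT hs (rest.dropWhile (fun x => !pvHdr x))
    else pvT hs rest
termination_by ls => ls.length
decreasing_by
  · exact Nat.lt_succ_of_le (List.length_dropWhile_le _ _)
  · simp

-- A's closing step, as a function of the loop state
def pvFinal (st : List String × List String × Bool) : List String :=
  if st.2.2 && !st.2.1.isEmpty then st.1 ++ [PySem.Str.join "\n" st.2.1] else st.1

lemma pvStepA_hdr (hs : List String) (s cur : List String) (r : Bool) (l : String)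
    (hl : pvHdr l = true) :
    pvStepA hs (s, cur, r) l
      = ((if r && !cur.isEmpty then s ++ [PySem.Str.join "\n" cur] else s), [l], pvRelB hs l) := by
  have h : PySem.Str.startswith l "## " = true := hl
  unfold pvStepA pvRelB
  rw [if_pos h]

lemma pvStepA_nohdr (hs : List String) (s cur : List String) (r : Bool) (l : String)
    (hl : pvHdr l = false) :
    pvStepA hs (s, cur, r) l = (s, cur ++ [l], r) := by
  have h : ¬ (PySem.Str.startswith l "## " = true) := by
    rw [show PySem.Str.startswith l "## " = false from hl]
    simp
  unfold pvStepA
  rw [if_neg h]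

lemma pvStepB_hdr (hs : List String) (sr tl : List String) (l : String)
    (hl : pvHdr l = true) :
    pvStepB hs (sr, tl) l
      = ((if pvRelB hs l then sr ++ [PySem.Str.join "\n" ([l] ++ tl.reverse)] else sr), []) := by
  have h : PySem.Str.startswith l "## " = true := hl
  unfold pvStepB
  rw [if_pos h]

lemma pvStepB_nohdr (hs : List String) (sr tl : List String) (l : String)
    (hl : pvHdr l = false) :
    pvStepB hs (sr, tl) l = (sr, tl ++ [l]) := by
  have h : ¬ (PySem.Str.startswith l "## " = true) := by
    rw [show PySem.Str.startswith l "## " = false from hl]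
    simp
  unfold pvStepB
  rw [if_neg h]

-- pvT ignores leading non-header lines
lemma pvT_dropWhile (hs : List String) (ls : List String) :
    pvT hs (ls.dropWhile (fun x => !pvHdr x)) = pvT hs ls := by
  induction ls with
  | nil => rfl
  | cons l rest ih =>
    by_cases hl : pvHdr l = true
    · rw [List.dropWhile_cons_of_neg (by simp [hl])]
    · have hl' : pvHdr l = false := by simpa using hl
      rw [List.dropWhile_cons_of_pos (by simp [hl']), ih, pvT]
      simp [hl']

-- A's already-saved sections pass through the rest of the loop untouched (s is a prefix)
lemma pvA_prefix (hs : List String) (ls : List String) (s cur : List String) (r : Bool) :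
    pvFinal (ls.foldl (pvStepA hs) (s, cur, r)) = s ++ pvFinal (ls.foldl (pvStepA hs) ([], cur, r)) := by
  induction ls generalizing s cur r with
  | nil => simp only [List.foldl_nil, pvFinal]; split_ifs <;> simp
  | cons l rest ih =>
    by_cases hl : pvHdr l = true
    · rw [List.foldl_cons, List.foldl_cons, pvStepA_hdr hs s cur r l hl, pvStepA_hdr hs [] cur r l hl]
      rw [ih, ih (if r && !cur.isEmpty then [] ++ [PySem.Str.join "\n" cur] else [])]
      split_ifs <;> simp
    · have hl' : pvHdr l = false := by simpa using hl
      rw [List.foldl_cons, List.foldl_cons, pvStepA_nohdr hs s cur r l hl', pvStepA_nohdr hs [] cur r l hl']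
      exact ih _ _ _

-- Master invariant for A's loop: from a state with a nonempty current section open,
-- the final sections are the (possibly saved) completed current section followed by
-- the relevant sections of the remaining header-led blocks.
lemma pvA_master (hs : List String) (ls : List String) (cur : List String) (r : Bool) (hcur : cur ≠ []) :
    pvFinal (ls.foldl (pvStepA hs) ([], cur, r)) =
      (if r then [PySem.Str.join "\n" (cur ++ ls.takeWhile (fun x => !pvHdr x))] else [])
        ++ pvT hs (ls.dropWhile (fun x => !pvHdr x)) := by
  induction ls generalizing cur r with
  | nil =>
    simp only [List.foldl_nil, pvFinal, List.takeWhile_nil, List.dropWhile_nil, List.append_nil]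
    rw [pvT]
    cases r <;> simp [hcur]
  | cons l rest ih =>
    by_cases hl : pvHdr l = true
    · rw [List.foldl_cons, pvStepA_hdr hs [] cur r l hl]
      rw [pvA_prefix, ih [l] _ (by simp)]
      rw [List.takeWhile_cons_of_neg (by simp [hl]), List.dropWhile_cons_of_neg (by simp [hl])]
      rw [pvT]
      cases r <;> simp [hl, hcur]
    · have hl' : pvHdr l = false := by simpa using hl
      rw [List.foldl_cons, pvStepA_nohdr hs [] cur r l hl']
      rw [ih (cur ++ [l]) r (by simp)]
      rw [List.takeWhile_cons_of_pos (by simp [hl']), List.dropWhile_cons_of_pos (by simp [hl'])]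
      simp [List.append_assoc]

-- A computes pvT
lemma pvA_eq_pvT (hs : List String) (lines : List String) :
    pvFinal (lines.foldl (pvStepA hs) ([], [], false)) = pvT hs lines := by
  cases lines with
  | nil => simp [pvFinal, pvT]
  | cons l rest =>
    by_cases hl : pvHdr l = true
    · rw [List.foldl_cons, pvStepA_hdr hs [] [] false l hl]
      rw [show (if false && !List.isEmpty ([] : List String) then [] ++ [PySem.Str.join "\n" []] else ([] : List String)) = [] by simp]
      rw [pvA_master hs rest [l] _ (by simp), pvT]
      simp [hl]
    · have hl' : pvHdr l = false := by simpa using hl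
      rw [List.foldl_cons, pvStepA_nohdr hs [] [] false l hl']
      rw [show ([] : List String) ++ [l] = [l] by rfl]
      rw [pvA_master hs rest [l] false (by simp), pvT_dropWhile]
      rw [pvT]
      simp [hl']

-- Invariant for B's bottom-up loop, phrased as a foldr over the lines
lemma pvB_foldr (hs : List String) (lines : List String) :
    lines.foldr (fun line st => pvStepB hs st line) ([], []) =
      ((pvT hs (lines.dropWhile (fun x => !pvHdr x))).reverse,
       (lines.takeWhile (fun x => !pvHdr x)).reverse) := by
  induction lines with
  | nil => simp [pvT]
  | cons l rest ih =>
    rw [List.foldr_cons, ih]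
    by_cases hl : pvHdr l = true
    · rw [pvStepB_hdr hs _ _ l hl]
      rw [List.takeWhile_cons_of_neg (by simp [hl]), List.dropWhile_cons_of_neg (by simp [hl])]
      rw [pvT]
      by_cases hr : pvRelB hs l = true
      · simp [hl, hr]
      · have hr' : pvRelB hs l = false := by simpa using hr
        simp [hl, hr']
    · have hl' : pvHdr l = false := by simpa using hl
      rw [pvStepB_nohdr hs _ _ l hl']
      rw [List.takeWhile_cons_of_pos (by simp [hl']), List.dropWhile_cons_of_pos (by simp [hl'])]
      simp

-- B computes pvT
lemma pvB_eq_pvT (hs : List String) (lines : List String) :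
    (lines.reverse.foldl (pvStepB hs) ([], [])).1.reverse = pvT hs lines := by
  rw [List.foldl_reverse, pvB_foldr, pvT_dropWhile]
  simp

-- ===== VERDICT (by name: the statement is the Claim_ definition above) =====
theorem extract_relevant_rules_book_sections_spec : Claim_equal_extract_relevant_rules_book_sections := by
  intro rules_book_text failing_phase failing_step _
  unfold Spec_extract_relevant_rules_book_sections
  have hA : extract_relevant_rules_book_sections rules_book_text failing_phase failing_step
      = pvFinish (pvFinal (((PySem.Str.split? rules_book_text "\n").getD []).foldl
          (pvStepA (pvHeaders failing_phase)) ([], [], false))) := rfl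
  have hB : extract_relevant_rules_book_sections_alt rules_book_text failing_phase failing_step
      = pvFinish ((((PySem.Str.split? rules_book_text "\n").getD []).reverse.foldl
          (pvStepB (pvHeaders failing_phase)) ([], [])).1.reverse) := rfl
  rw [hA, hB, pvB_eq_pvT]
  exact congrArg pvFinish (pvA_eq_pvT _ _)
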